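-- pv_equiv track=rewrite | github.com/zhukovgreen/interviews | codlity/demo_test.py | solution
-- ===== SOURCE A (Python) =====
-- from typing import List
--
-- def solution(a: List):
--     a = sorted(set(a))
--     if not (a):
--         return 1
--     if len(a) == 1:
--         return max(1, a[0] - 1)
--     for el_0, el_1 in zip(a, a[1:]):
--         if el_1 - el_0 > 1:
--             return max(1, el_0 + 1)
--     else:
--         return max(1, el_1 + 1)
-- ===== SOURCE B (Python) =====
-- def solution(a):
--     s = set(a)
--     if not s:
--         return 1
--     if len(s) == 1:
--         return max(1, next(iter(s)) - 1)
--     k = min(s)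
--     while k + 1 in s:
--         k += 1
--     return max(1, k + 1)
-- ===== Notes on version B (the rewrite author's own statement) =====
-- stated objective: faster
-- what changed: Replaces sort-then-scan-adjacent-pairs with a hash-set walk: find min(set) and advance while the successor is present; no sorting at all.
import Mathlib
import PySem

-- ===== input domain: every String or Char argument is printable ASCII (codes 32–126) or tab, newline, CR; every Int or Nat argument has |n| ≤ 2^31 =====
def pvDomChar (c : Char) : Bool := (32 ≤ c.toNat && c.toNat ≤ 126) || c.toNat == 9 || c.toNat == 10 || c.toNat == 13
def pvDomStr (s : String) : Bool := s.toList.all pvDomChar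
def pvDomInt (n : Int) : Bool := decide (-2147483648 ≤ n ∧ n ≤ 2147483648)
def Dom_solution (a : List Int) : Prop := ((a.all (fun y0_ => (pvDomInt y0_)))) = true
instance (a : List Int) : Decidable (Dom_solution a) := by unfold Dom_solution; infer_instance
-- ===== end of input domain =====

-- B replaces A's sort-and-scan with an O(n)-expected hash-set walk from min(set); objective: faster.

-- ===== PORT A =====
-- the for/else loop over zip(a, a[1:]); 'last' carries the most recent el_1 for the else branch
def solLoop (pairs : List (Int × Int)) (last : Int) : Int :=
  match pairs with
  | [] => max 1 (last + 1)
  | (e0, e1) :: rest => if e1 - e0 > 1 then max 1 (e0 + 1) else solLoop rest e1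

def solution (a : List Int) : Int :=
  let l := PySem.List.sorted (PySem.Set.ofList a) (fun x => x) false
  if l = [] then 1
  else if l.length = 1 then max 1 (PySem.List.pyGetD l 0 0 - 1)
  else solLoop (l.zip l.tail) 0

-- ===== PORT B =====
-- 'while k + 1 in s: k += 1'; terminates because members of s are bounded by s.foldl max 0
def walkB (s : List Int) (k : Int) : Int :=
  if h : (k + 1) ∈ s then walkB s (k + 1) else k
termination_by (s.foldl max 0 + 1 - k).toNat
decreasing_by
  have := (PySem.List.le_foldl_max s 0).2 _ h
  omega

def solution_alt (a : List Int) : Int :=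
  let s := PySem.Set.ofList a
  if s.isEmpty then 1
  else if s.length = 1 then max 1 (s.headD 0 - 1)
  else max 1 (walkB s ((PySem.List.min? s (fun x => x)).getD 0) + 1)

-- ===== PRECONDITION & SPEC =====
def Spec_solution (a : List Int) (out : Int) : Prop := out = solution_alt a
instance (a : List Int) (out : Int) : Decidable (Spec_solution a out) := by unfold Spec_solution; infer_instance

-- ===== CLAIM (what is proved, stated in full; the proofs are below) =====
def Claim_equal_solution : Prop := ∀ (a : List Int), Dom_solution a → Spec_solution a (solution a)

-- ===== LEMMAS AND PROOFS =====

theorem walkB_of_not_mem (s : List Int) (k : Int) (h : (k + 1) ∉ s) : walkB s k = k := by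
  rw [walkB]; simp [h]

theorem walkB_of_mem (s : List Int) (k : Int) (h : (k + 1) ∈ s) : walkB s k = walkB s (k + 1) := by
  rw [walkB]; simp [h]

theorem walkB_congr_aux (s t : List Int) : ∀ (n : Nat) (k : Int),
    (s.foldl max 0 + 1 - k).toNat ≤ n →
    (∀ m : Int, k < m → (m ∈ s ↔ m ∈ t)) → walkB s k = walkB t k := by
  intro n
  induction n with
  | zero =>
    intro k hn h
    have hns : (k + 1) ∉ s := by
      intro hm
      have := (PySem.List.le_foldl_max s 0).2 _ hm
      omega
    have hnt : (k + 1) ∉ t := by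
      intro hm
      exact hns ((h (k + 1) (by omega)).mpr hm)
    rw [walkB_of_not_mem s k hns, walkB_of_not_mem t k hnt]
  | succ n ih =>
    intro k hn h
    by_cases hm : (k + 1) ∈ s
    · have hmt : (k + 1) ∈ t := (h (k + 1) (by omega)).mp hm
      rw [walkB_of_mem s k hm, walkB_of_mem t k hmt]
      have hb := (PySem.List.le_foldl_max s 0).2 _ hm
      exact ih (k + 1) (by omega) (fun m hmk => h m (by omega))
    · have hnt : (k + 1) ∉ t := fun hm2 => hm ((h (k + 1) (by omega)).mpr hm2)
      rw [walkB_of_not_mem s k hm, walkB_of_not_mem t k hnt]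

theorem walkB_congr (s t : List Int) (k : Int)
    (h : ∀ m : Int, k < m → (m ∈ s ↔ m ∈ t)) : walkB s k = walkB t k :=
  walkB_congr_aux s t (s.foldl max 0 + 1 - k).toNat k (le_refl _) h

-- main bridge: on a strictly increasing list of length ≥ 2, A's pair scan equals B's walk
theorem solLoop_eq_walk (rest : List Int) : ∀ (x y d : Int),
    (x :: y :: rest).Pairwise (· < ·) →
    solLoop ((x :: y :: rest).zip (y :: rest)) d = max 1 (walkB (x :: y :: rest) x + 1) := by
  induction rest with
  | nil =>
    intro x y d hp
    have hxy : x < y := by simpa using hp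
    by_cases hgap : y - x > 1
    · have hnm : (x + 1) ∉ [x, y] := by
        simp; omega
      rw [walkB_of_not_mem _ _ hnm]
      simp [solLoop, hgap]
    · have hy : y = x + 1 := by omega
      have h1 : (x + 1) ∈ [x, y] := by simp [hy]
      have h2 : (y + 1) ∉ [x, y] := by simp; omega
      rw [walkB_of_mem _ _ h1, ← hy, walkB_of_not_mem _ _ h2]
      simp [solLoop, hgap]
  | cons z rs ih =>
    intro x y d hp
    obtain ⟨hph, hp'⟩ := List.pairwise_cons.mp hp
    have hxy : x < y := hph y (by simp)
    by_cases hgap : y - x > 1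
    · have hnm : (x + 1) ∉ x :: y :: z :: rs := by
        intro hm
        rw [List.mem_cons] at hm
        rcases hm with hm | hm
        · omega
        · have := hph _ hm
          have hyle : y ≤ x + 1 := by
            rw [List.mem_cons] at hm
            rcases hm with hm | hm
            · omega
            · have := (List.pairwise_cons.mp hp').1 _ hm; omega
          omega
      rw [walkB_of_not_mem _ _ hnm]
      simp [solLoop, hgap]
    · have hy : y = x + 1 := by omega
      have h1 : (x + 1) ∈ x :: y :: z :: rs := by simp [hy]
      have hcg : walkB (x :: y :: z :: rs) y = walkB (y :: z :: rs) y := by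
        apply walkB_congr
        intro m hm
        rw [List.mem_cons]
        constructor
        · intro hmem
          rcases hmem with hmem | hmem
          · omega
          · exact hmem
        · intro hmem; exact Or.inr hmem
      have hrec := ih y z y hp'
      have step : solLoop ((x :: y :: z :: rs).zip (y :: z :: rs)) d
          = solLoop ((y :: z :: rs).zip (z :: rs)) y := by
        rw [List.zip_cons_cons]
        simp [solLoop, hgap]
      rw [step, hrec, walkB_of_mem _ _ h1, ← hy, hcg]

-- ===== VERDICT (by name: the statement is the Claim_ definition above) =====
theorem solution_spec : Claim_equal_solution := by
  unfold Claim_equal_solution Spec_solution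
  intro a _
  unfold solution solution_alt
  have hperm := PySem.List.sorted_perm (PySem.Set.ofList a) (fun x => x) false
  rcases hL : PySem.List.sorted (PySem.Set.ofList a) (fun x => x) false with _ | ⟨x, _ | ⟨y, t2⟩⟩ <;>
    rw [hL] at hperm
  · -- empty
    have hse : PySem.Set.ofList a = [] :=
      (PySem.List.sorted_eq_nil_iff (PySem.Set.ofList a) (fun x => x) false).mp hL
    simp [hse]
  · -- singleton
    have hse : PySem.Set.ofList a = [x] := List.perm_singleton.mp hperm.symm
    simp [hse]
  · -- length ≥ 2
    have hpw : (x :: y :: t2).Pairwise (· < ·) := by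
      rw [← hL]; exact PySem.List.sorted_ofList_pairwise_lt a
    have hsne : PySem.Set.ofList a ≠ [] := by
      intro h0; rw [h0] at hperm; simp at hperm
    have hslen : (PySem.Set.ofList a).length ≠ 1 := by
      rw [← hperm.length_eq]; simp
    obtain ⟨m, hm⟩ : ∃ m, PySem.List.min? (PySem.Set.ofList a) (fun x => x) = some m := by
      cases h : PySem.List.min? (PySem.Set.ofList a) (fun x => x) with
      | none => exact absurd ((PySem.List.min?_eq_none_iff _ _).mp h) hsne
      | some m => exact ⟨m, rfl⟩
    have hxmem : x ∈ PySem.Set.ofList a := hperm.mem_iff.mp (by simp)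
    have hmx : m = x := by
      have h1 : m ≤ x := PySem.List.min?_isMin hm x hxmem
      have h2 : x ≤ m := PySem.List.key_head_sorted_le _ _ hL m (PySem.List.min?_mem hm)
      omega
    have hwalk : walkB (PySem.Set.ofList a) x = walkB (x :: y :: t2) x :=
      walkB_congr _ _ x (fun p _ => hperm.mem_iff.symm)
    have hmain := solLoop_eq_walk t2 x y 0 hpw
    simp only [List.isEmpty_iff]
    rw [if_neg (by simp), if_neg (by simp), if_neg hsne, if_neg hslen, hm]
    simp only [Option.getD_some, hmx, hwalk]
    exact hmain
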